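-- pv_equiv track=rewrite | github.com/aXtr1o1/RFP-Proposal-Platform | apps/app/services/template_analyzer.py | _normalize_layout_name
-- ===== SOURCE A (Python) =====
-- def _normalize_layout_name(name: str) -> str:
--     """Normalize layout name to a valid key"""
--     normalized = name.lower()
--     for char in [" ", "-", ".", ",", "(", ")", "[", "]", "'"]:
--         normalized = normalized.replace(char, "_")
--     while "__" in normalized:
--         normalized = normalized.replace("__", "_")
--     normalized = normalized.strip("_")
--     return normalized or "unnamed_layout"
-- ===== SOURCE B (Python) =====
-- def _normalize_layout_name(name: str) -> str:
--     seps = set(" -.,()[]'_")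
--     out = []
--     prev_underscore = False
--     for ch in name.lower():
--         if ch in seps:
--             if not prev_underscore:
--                 out.append("_")
--             prev_underscore = True
--         else:
--             out.append(ch)
--             prev_underscore = False
--     result = "".join(out).strip("_")
--     return result or "unnamed_layout"
-- ===== Notes on version B (the rewrite author's own statement) =====
-- stated objective: alternative
-- what changed: Replaces the nine sequential replace passes plus the repeated double-underscore-collapsing while-loop with one linear scan that emits a single separator mark per separator run (tracking a prev-underscore flag), then strips and applies the empty-name fallback.
import Mathlib
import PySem

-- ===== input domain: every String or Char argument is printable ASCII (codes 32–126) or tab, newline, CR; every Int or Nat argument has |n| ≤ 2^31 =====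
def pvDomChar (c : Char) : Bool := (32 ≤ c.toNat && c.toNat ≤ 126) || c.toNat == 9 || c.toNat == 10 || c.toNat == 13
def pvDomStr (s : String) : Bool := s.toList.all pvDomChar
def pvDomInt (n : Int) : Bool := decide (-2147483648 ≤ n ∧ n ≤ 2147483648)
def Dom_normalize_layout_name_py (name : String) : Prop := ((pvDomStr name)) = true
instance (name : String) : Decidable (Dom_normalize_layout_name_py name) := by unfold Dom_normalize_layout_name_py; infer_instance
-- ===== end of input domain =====

-- B replaces A's nine replace passes + '__'-collapse while-loop by ONE linear scan with a prev-underscore flag; same return value proved.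

-- ===== PORT A =====

-- one replace("__","_") pass, written out structurally (proved equal to PySem.Chars.replace below; needed for the loop's termination)
def pvRepOnce : List Char → List Char
  | [] => []
  | [c] => [c]
  | a :: b :: r => if a == '_' && b == '_' then '_' :: pvRepOnce r else a :: pvRepOnce (b :: r)

-- "__" occurs (two adjacent underscores)
def pvHasDD : List Char → Bool
  | a :: b :: r => (a == '_' && b == '_') || pvHasDD (b :: r)
  | _ => false

theorem pvRepOnce_cons2 (a b : Char) (r : List Char) :
    pvRepOnce (a :: b :: r) = if a == '_' && b == '_' then '_' :: pvRepOnce r else a :: pvRepOnce (b :: r) := rfl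

theorem pvHasDD_cons2 (a b : Char) (r : List Char) :
    pvHasDD (a :: b :: r) = ((a == '_' && b == '_') || pvHasDD (b :: r)) := rfl

-- lemmas the while-loop port needs for termination (cited in decreasing_by)
theorem pvRepOnce_len_le (l : List Char) : (pvRepOnce l).length ≤ l.length := by
  fun_induction pvRepOnce l with
  | case1 => simp
  | case2 => simp
  | case3 a b r h ih => simp only [List.length_cons] at *; omega
  | case4 a b r h ih => simp only [List.length_cons] at *; omega

theorem pvRepOnce_len_lt (l : List Char) (h : pvHasDD l = true) : (pvRepOnce l).length < l.length := by
  fun_induction pvRepOnce l with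
  | case1 => simp [pvHasDD] at h
  | case2 => simp [pvHasDD] at h
  | case3 a b r hab ih =>
      have := pvRepOnce_len_le r
      simp only [List.length_cons] at *; omega
  | case4 a b r hab ih =>
      rw [Bool.not_eq_true] at hab
      rw [pvHasDD_cons2, hab, Bool.false_or] at h
      have := ih h
      simp only [List.length_cons] at *; omega

-- PySem.Chars.replace with pattern "__" and replacement "_" is exactly pvRepOnce
theorem pvReplace_go_dd (fuel : Nat) : ∀ (l acc : List Char), l.length ≤ fuel →
    PySem.Chars.replace.go ['_','_'] ['_'] fuel l acc = acc.reverse ++ pvRepOnce l := by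
  induction fuel with
  | zero =>
      intro l acc h
      have : l = [] := List.eq_nil_of_length_eq_zero (Nat.le_zero.mp h)
      subst this; simp [PySem.Chars.replace.go, pvRepOnce]
  | succ fuel ih =>
      intro l acc h
      match l with
      | [] => simp [PySem.Chars.replace.go, pvRepOnce]
      | [c] =>
          simp only [PySem.Chars.replace.go]
          have hpre : List.isPrefixOf ['_','_'] [c] = false := by
            simp [List.isPrefixOf]
          rw [hpre]
          simp only [Bool.false_eq_true, if_false]
          rw [ih [] (c :: acc) (by simp)]
          simp [pvRepOnce]
      | a :: b :: r =>
          simp only [PySem.Chars.replace.go]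
          by_cases hab : a = '_' ∧ b = '_'
          · obtain ⟨ha, hb⟩ := hab; subst ha; subst hb
            rw [show List.isPrefixOf ['_','_'] ('_' :: '_' :: r) = true from rfl]
            simp only [if_true]
            have hlen : r.length ≤ fuel := by simp at h; omega
            rw [show List.drop (['_','_'] : List Char).length ('_' :: '_' :: r) = r from rfl]
            rw [ih r _ hlen]
            simp [pvRepOnce]
          · have hpre : List.isPrefixOf ['_','_'] (a :: b :: r) = false := by
              simp [List.isPrefixOf]
              intro ha hb; exact hab ⟨ha.symm, hb.symm⟩
            rw [hpre]
            simp only [Bool.false_eq_true, if_false]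
            rw [ih (b :: r) (a :: acc) (by simp at h ⊢; omega)]
            have hf : (a == '_' && b == '_') = false := by
              simp; intro ha hb; exact hab ⟨ha, hb⟩
            rw [pvRepOnce_cons2, hf]
            simp

theorem pvReplace_dd (cs : List Char) :
    PySem.Chars.replace cs ['_','_'] ['_'] = pvRepOnce cs := by
  rw [show PySem.Chars.replace cs ['_','_'] ['_']
        = PySem.Chars.replace.go ['_','_'] ['_'] cs.length cs [] from by
      simp [PySem.Chars.replace]]
  rw [pvReplace_go_dd cs.length cs [] le_rfl]; simp

theorem pvInfix_hasDD (pre suf : List Char) : pvHasDD (pre ++ '_' :: '_' :: suf) = true := by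
  induction pre with
  | nil => simp [pvHasDD]
  | cons x xs ih =>
      cases hxs : xs ++ '_' :: '_' :: suf with
      | nil => simp at hxs
      | cons y ys =>
          rw [List.cons_append, hxs, pvHasDD_cons2, ← hxs, ih]
          simp

theorem pvIsIn_dd_hasDD (s : String) (h : PySem.Str.isIn "__" s = true) : pvHasDD s.toList = true := by
  rw [PySem.Str.isIn_iff_infix] at h
  rw [show ("__" : String).toList = ['_','_'] from rfl] at h
  obtain ⟨pre, suf, hps⟩ := h
  rw [← hps, show pre ++ ['_','_'] ++ suf = pre ++ '_' :: '_' :: suf from by simp]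
  exact pvInfix_hasDD pre suf

-- the `while "__" in s: s = s.replace("__","_")` loop, ported as recursion on the shrinking string
def pvCollapseLoop (s : String) : String :=
  if h : PySem.Str.isIn "__" s = true then
    pvCollapseLoop (PySem.Str.replace s "__" "_")
  else s
termination_by s.toList.length
decreasing_by
  simp only [PySem.Str.replace]
  rw [show ("__" : String).toList = ['_','_'] from rfl, show ("_" : String).toList = ['_'] from rfl]
  rw [String.toList_ofList, pvReplace_dd]
  exact pvRepOnce_len_lt _ (pvIsIn_dd_hasDD s h)

def normalize_layout_name_py (name : String) : String :=
  let normalized := PySem.Str.lower name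
  let normalized :=
    ([" ", "-", ".", ",", "(", ")", "[", "]", "'"] : List String).foldl
      (fun s ch => PySem.Str.replace s ch "_") normalized
  let normalized := pvCollapseLoop normalized
  let normalized := PySem.Str.stripChars normalized "_"
  if normalized = "" then "unnamed_layout" else normalized

-- ===== PORT B =====

-- single pass: emit one '_' per separator run (prev = "currently inside a separator run")
def pvScan : Bool → List Char → List Char
  | _, [] => []
  | prev, c :: r =>
      if (" -.,()[]'_" : String).toList.contains c then
        (if prev then pvScan true r else '_' :: pvScan true r)
      else c :: pvScan false r

def normalize_layout_name_py_alt (name : String) : String :=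
  let out := pvScan false (PySem.Str.lower name).toList
  let result := PySem.Str.stripChars (String.ofList out) "_"
  if result = "" then "unnamed_layout" else result

-- ===== PRECONDITION & SPEC =====
def Spec_normalize_layout_name_py (name : String) (out : String) : Prop := out = normalize_layout_name_py_alt name
instance (name : String) (out : String) : Decidable (Spec_normalize_layout_name_py name out) := by unfold Spec_normalize_layout_name_py; infer_instance

-- ===== CLAIM (what is proved, stated in full; the proofs are below) =====
def Claim_equal_normalize_layout_name_py : Prop := ∀ (name : String), Dom_normalize_layout_name_py name → Spec_normalize_layout_name_py name (normalize_layout_name_py name)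

-- ===== LEMMAS AND PROOFS =====

-- collapse all runs of '_' to a single '_' (the common fixpoint both programs reach)
def pvSqueeze : List Char → List Char
  | [] => []
  | [c] => [c]
  | a :: b :: r => if a == '_' && b == '_' then pvSqueeze (b :: r) else a :: pvSqueeze (b :: r)

theorem pvSqueeze_cons2 (a b : Char) (r : List Char) :
    pvSqueeze (a :: b :: r) = if a == '_' && b == '_' then pvSqueeze (b :: r) else a :: pvSqueeze (b :: r) := rfl

theorem pvScan_cons (prev : Bool) (c : Char) (r : List Char) :
    pvScan prev (c :: r) = if (" -.,()[]'_" : String).toList.contains c then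
        (if prev then pvScan true r else '_' :: pvScan true r)
      else c :: pvScan false r := rfl

theorem pvSqueeze_cons_congr (a : Char) (xs ys : List Char)
    (hh : xs.head? = ys.head?) (hs : pvSqueeze xs = pvSqueeze ys) :
    pvSqueeze (a :: xs) = pvSqueeze (a :: ys) := by
  match xs, ys with
  | [], [] => rfl
  | x :: xs', y :: ys' =>
      simp only [List.head?] at hh
      injection hh with hxy
      subst hxy
      rw [pvSqueeze_cons2, pvSqueeze_cons2, hs]
  | [], y :: ys' => simp at hh
  | x :: xs', [] => simp at hh

theorem pvRepOnce_head? (l : List Char) : (pvRepOnce l).head? = l.head? := by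
  fun_induction pvRepOnce l with
  | case1 => rfl
  | case2 => rfl
  | case3 a b r h ih => simp at h; simp [h.1]
  | case4 a b r h ih => simp

theorem pvSqueeze_repOnce (l : List Char) : pvSqueeze (pvRepOnce l) = pvSqueeze l := by
  fun_induction pvRepOnce l with
  | case1 => rfl
  | case2 => rfl
  | case3 a b r h ih =>
      simp only [Bool.and_eq_true, beq_iff_eq] at h
      obtain ⟨ha, hb⟩ := h; subst ha; subst hb
      rw [show pvSqueeze ('_' :: '_' :: r) = pvSqueeze ('_' :: r) from rfl]
      exact pvSqueeze_cons_congr '_' (pvRepOnce r) r (pvRepOnce_head? r) ih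
  | case4 a b r h ih =>
      exact pvSqueeze_cons_congr a (pvRepOnce (b :: r)) (b :: r) (pvRepOnce_head? _) ih

theorem pvSqueeze_of_not_hasDD (l : List Char) (h : pvHasDD l = false) : pvSqueeze l = l := by
  fun_induction pvSqueeze l with
  | case1 => rfl
  | case2 => rfl
  | case3 a b r hab ih => rw [pvHasDD_cons2, hab] at h; simp at h
  | case4 a b r hab ih =>
      rw [Bool.not_eq_true] at hab
      rw [pvHasDD_cons2, hab, Bool.false_or] at h
      rw [ih h]

theorem pvHasDD_infix (l : List Char) (h : pvHasDD l = true) : ['_','_'] <:+: l := by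
  fun_induction pvHasDD l with
  | case1 a b r ih =>
      simp only [Bool.or_eq_true, Bool.and_eq_true, beq_iff_eq] at h
      rcases h with ⟨ha, hb⟩ | h
      · subst ha; subst hb; exact ⟨[], r, rfl⟩
      · exact List.infix_cons (ih h)
  | case2 => simp [pvHasDD] at h

theorem pvNot_isIn_not_hasDD (s : String) (h : ¬ PySem.Str.isIn "__" s = true) : pvHasDD s.toList = false := by
  cases hx : pvHasDD s.toList with
  | false => rfl
  | true =>
      exfalso; apply h
      rw [PySem.Str.isIn_iff_infix, show ("__" : String).toList = ['_','_'] from rfl]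
      exact pvHasDD_infix _ hx

theorem pvCollapse_eq_squeeze (s : String) : (pvCollapseLoop s).toList = pvSqueeze s.toList := by
  rw [pvCollapseLoop]
  split
  case isTrue h =>
    rw [pvCollapse_eq_squeeze (PySem.Str.replace s "__" "_")]
    simp only [PySem.Str.replace]
    rw [show ("__" : String).toList = ['_','_'] from rfl, show ("_" : String).toList = ['_'] from rfl]
    rw [String.toList_ofList, pvReplace_dd]
    exact pvSqueeze_repOnce s.toList
  case isFalse h =>
    exact (pvSqueeze_of_not_hasDD s.toList (pvNot_isIn_not_hasDD s h)).symm
termination_by s.toList.length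
decreasing_by
  rename_i h
  simp only [PySem.Str.replace]
  rw [show ("__" : String).toList = ['_','_'] from rfl, show ("_" : String).toList = ['_'] from rfl]
  rw [String.toList_ofList, pvReplace_dd]
  exact pvRepOnce_len_lt _ (pvIsIn_dd_hasDD s h)

-- single-character replace is a map over the characters
theorem pvReplace_go_single (o n : Char) (fuel : Nat) : ∀ (l acc : List Char), l.length ≤ fuel →
    PySem.Chars.replace.go [o] [n] fuel l acc
      = acc.reverse ++ l.map (fun c => if c = o then n else c) := by
  induction fuel with
  | zero =>
      intro l acc h
      have : l = [] := List.eq_nil_of_length_eq_zero (Nat.le_zero.mp h)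
      subst this; simp [PySem.Chars.replace.go]
  | succ fuel ih =>
      intro l acc h
      match l with
      | [] => simp [PySem.Chars.replace.go]
      | c :: t =>
          simp only [PySem.Chars.replace.go]
          by_cases hc : c = o
          · subst hc
            rw [show List.isPrefixOf [c] (c :: t) = true from by simp [List.isPrefixOf]]
            simp only [if_true]
            rw [show List.drop ([c] : List Char).length (c :: t) = t from rfl]
            rw [ih t _ (by simp at h; omega)]
            simp
          · have hpre : List.isPrefixOf [o] (c :: t) = false := by
              simp [List.isPrefixOf]; exact fun h' => hc h'.symm
            rw [hpre]
            simp only [Bool.false_eq_true, if_false]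
            rw [ih t (c :: acc) (by simp at h; omega)]
            simp [hc]

theorem pvReplace_single (cs : List Char) (o n : Char) :
    PySem.Chars.replace cs [o] [n] = cs.map (fun c => if c = o then n else c) := by
  rw [show PySem.Chars.replace cs [o] [n]
        = PySem.Chars.replace.go [o] [n] cs.length cs [] from by simp [PySem.Chars.replace]]
  rw [pvReplace_go_single o n cs.length cs [] le_rfl]; simp

def pvG (o : Char) (c : Char) : Char := if c = o then '_' else c

theorem pvStrReplace_single (s : String) (oS : String) (o : Char) (hS : oS.toList = [o]) :
    (PySem.Str.replace s oS "_").toList = s.toList.map (pvG o) := by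
  simp only [PySem.Str.replace, hS, show ("_" : String).toList = ['_'] from rfl,
    String.toList_ofList, pvReplace_single]
  rfl

def pvRepl (c : Char) : Char := if (" -.,()[]'_" : String).toList.contains c then '_' else c

theorem pvCharStep (c : Char) :
    pvG '\'' (pvG ']' (pvG '[' (pvG ')' (pvG '(' (pvG ',' (pvG '.' (pvG '-' (pvG ' ' c)))))))) = pvRepl c := by
  by_cases h1 : c = ' '
  · subst h1; rfl
  by_cases h2 : c = '-'
  · subst h2; rfl
  by_cases h3 : c = '.'
  · subst h3; rfl
  by_cases h4 : c = ','
  · subst h4; rfl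
  by_cases h5 : c = '('
  · subst h5; rfl
  by_cases h6 : c = ')'
  · subst h6; rfl
  by_cases h7 : c = '['
  · subst h7; rfl
  by_cases h8 : c = ']'
  · subst h8; rfl
  by_cases h9 : c = '\''
  · subst h9; rfl
  by_cases h10 : c = '_'
  · subst h10; rfl
  simp only [pvG]
  rw [if_neg h1, if_neg h2, if_neg h3, if_neg h4, if_neg h5, if_neg h6, if_neg h7, if_neg h8, if_neg h9]
  have hnc : ¬ (" -.,()[]'_" : String).toList.contains c = true := by
    rw [show (" -.,()[]'_" : String).toList = [' ','-','.',',','(',')','[',']','\'','_'] from rfl]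
    simp only [List.contains_eq_mem, decide_eq_true_eq, List.mem_cons, List.not_mem_nil, or_false]
    tauto
  unfold pvRepl
  rw [if_neg hnc]

theorem pvChainA (s : String) :
    (([" ", "-", ".", ",", "(", ")", "[", "]", "'"] : List String).foldl
        (fun t ch => PySem.Str.replace t ch "_") s).toList = s.toList.map pvRepl := by
  simp only [List.foldl_cons, List.foldl_nil]
  rw [pvStrReplace_single _ "'" '\'' rfl, pvStrReplace_single _ "]" ']' rfl,
      pvStrReplace_single _ "[" '[' rfl, pvStrReplace_single _ ")" ')' rfl,
      pvStrReplace_single _ "(" '(' rfl, pvStrReplace_single _ "," ',' rfl,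
      pvStrReplace_single _ "." '.' rfl, pvStrReplace_single _ "-" '-' rfl,
      pvStrReplace_single _ " " ' ' rfl]
  simp only [List.map_map]
  have hfun : (pvG '\'' ∘ pvG ']' ∘ pvG '[' ∘ pvG ')' ∘ pvG '(' ∘ pvG ',' ∘ pvG '.' ∘ pvG '-' ∘ pvG ' ')
      = pvRepl := by
    funext c
    simp only [Function.comp]
    exact pvCharStep c
  rw [hfun]

theorem pvSqueeze_cons_ne (c : Char) (xs : List Char) (hc : c ≠ '_') :
    pvSqueeze (c :: xs) = c :: pvSqueeze xs := by
  match xs with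
  | [] => rfl
  | b :: r => rw [pvSqueeze_cons2]; simp [hc]

theorem pvScan_spec (cs : List Char) :
    ('_' :: pvScan true cs = pvSqueeze ('_' :: cs.map pvRepl))
    ∧ (pvScan false cs = pvSqueeze (cs.map pvRepl)) := by
  induction cs with
  | nil => exact ⟨rfl, rfl⟩
  | cons c r ih =>
      obtain ⟨ihT, ihF⟩ := ih
      by_cases hc : (" -.,()[]'_" : String).toList.contains c = true
      · have hrepl : pvRepl c = '_' := by unfold pvRepl; exact if_pos hc
        constructor
        · rw [pvScan_cons, if_pos hc, if_pos rfl, List.map_cons, hrepl]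
          rw [show pvSqueeze ('_' :: '_' :: r.map pvRepl) = pvSqueeze ('_' :: r.map pvRepl) from rfl]
          exact ihT
        · rw [pvScan_cons, if_pos hc, if_neg (by simp), List.map_cons, hrepl]
          exact ihT
      · have hcne : c ≠ '_' := by
          intro h; subst h; exact hc (by decide)
        have hrepl : pvRepl c = c := by unfold pvRepl; exact if_neg hc
        constructor
        · rw [pvScan_cons, if_neg hc, List.map_cons, hrepl]
          rw [show pvSqueeze ('_' :: c :: r.map pvRepl)
                = '_' :: pvSqueeze (c :: r.map pvRepl) from by
            rw [pvSqueeze_cons2]; simp [hcne]]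
          rw [pvSqueeze_cons_ne c _ hcne, ihF]
        · rw [pvScan_cons, if_neg hc, List.map_cons, hrepl]
          rw [pvSqueeze_cons_ne c _ hcne, ihF]

-- ===== VERDICT (by name: the statement is the Claim_ definition above) =====
theorem normalize_layout_name_py_spec : Claim_equal_normalize_layout_name_py := by
  intro name _
  unfold Spec_normalize_layout_name_py normalize_layout_name_py normalize_layout_name_py_alt
  have hkey : (pvCollapseLoop
      (([" ", "-", ".", ",", "(", ")", "[", "]", "'"] : List String).foldl
        (fun s ch => PySem.Str.replace s ch "_") (PySem.Str.lower name))).toList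
      = pvScan false (PySem.Str.lower name).toList := by
    rw [pvCollapse_eq_squeeze, pvChainA, (pvScan_spec _).2]
  have hstrip : PySem.Str.stripChars (pvCollapseLoop
      (([" ", "-", ".", ",", "(", ")", "[", "]", "'"] : List String).foldl
        (fun s ch => PySem.Str.replace s ch "_") (PySem.Str.lower name))) "_"
      = PySem.Str.stripChars (String.ofList (pvScan false (PySem.Str.lower name).toList)) "_" := by
    simp only [PySem.Str.stripChars]
    rw [hkey]
    simp only [String.toList_ofList]
  simp only [hstrip]
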